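-- pv_equiv track=rewrite | github.com/0Dr3f/RouteNinja | route_ninja.py | _enumerate_to_root
-- ===== SOURCE A (Python) =====
-- from typing import Dict, Iterable, List, Optional, Sequence, Set, Tuple
--
-- def _enumerate_to_root(pred: Dict[int, List[int]], node: int, limit: int
--                        ) -> List[List[int]]:
--     """DFS via predecessor links (iterative). Root-first paths terminating at `node`."""
--     out: List[List[int]] = []
--     # Stack entries: (current, path_from_node_back_to_current)
--     stack: List[Tuple[int, List[int]]] = [(node, [node])]
--     while stack and len(out) < limit:
--         cur, path = stack.pop()
--         parents = pred.get(cur, [])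
--         if not parents:
--             out.append(list(reversed(path)))
--             continue
--         for p in parents:
--             if p in path:          # cycle guard — level BFS already prevents this
--                 continue            # defensively skip anyway
--             stack.append((p, path + [p]))
--     return out
-- ===== SOURCE B (Python) =====
-- def _enumerate_to_root(pred, node, limit):
--     """Lazy generator over predecessor links; root-first paths ending at `node`.
--
--     `paths` yields the full enumeration (parents taken in reverse to match the
--     LIFO order of the stack version); the caller consumes the first `limit`.
--     """
--     def paths(cur, path):
--         parents = pred.get(cur, [])
--         if not parents:
--             yield list(reversed(path))
--             return
--         for p in reversed(parents):
--             if p not in path: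
--                 yield from paths(p, path + [p])
--
--     out = []
--     for full in paths(node, [node]):
--         if len(out) >= limit:
--             break
--         out.append(full)
--     return out
-- ===== Notes on version B (the rewrite author's own statement) =====
-- stated objective: alternative
-- what changed: Replaces the explicit stack machine with a pure recursive generator of the full path enumeration (parents taken in reverse), from which the consumer takes the first `limit` paths.
import Mathlib
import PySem

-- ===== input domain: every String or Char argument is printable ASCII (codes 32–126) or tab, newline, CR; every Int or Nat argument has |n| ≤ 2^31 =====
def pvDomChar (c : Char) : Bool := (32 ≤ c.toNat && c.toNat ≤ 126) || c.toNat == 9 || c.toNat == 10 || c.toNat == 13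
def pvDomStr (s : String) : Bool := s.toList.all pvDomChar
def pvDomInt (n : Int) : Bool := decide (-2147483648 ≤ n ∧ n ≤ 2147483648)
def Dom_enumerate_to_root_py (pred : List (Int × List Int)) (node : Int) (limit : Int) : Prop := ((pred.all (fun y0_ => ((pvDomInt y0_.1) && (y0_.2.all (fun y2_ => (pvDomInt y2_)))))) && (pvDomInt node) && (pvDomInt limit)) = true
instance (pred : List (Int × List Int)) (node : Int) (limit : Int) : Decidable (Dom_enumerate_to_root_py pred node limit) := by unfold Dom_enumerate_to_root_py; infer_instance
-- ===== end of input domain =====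

-- B replaces A's explicit-stack machine by a pure recursive enumeration of all
-- root-first paths (a lazy generator in Python) truncated to the first `limit`;
-- objective: alternative decomposition, identical output (order and cutoff).


-- ===== PORT A =====
-- `pred.get(cur, [])` on the association list: first matching key, default [] (exact Python dict lookup).
def pvGetD (pred : List (Int × List Int)) (k : Int) : List Int :=
  match pred with
  | [] => []
  | (k', v) :: rest => if k' = k then v else pvGetD rest k

-- longest parent list in the dict (used only to size the fuel below)
def pvKmax (pred : List (Int × List Int)) : Nat :=
  pred.foldr (fun kv m => max kv.2.length m) 0

-- all ints the DFS can ever visit, deduplicated (used only to size the fuel below)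
def pvUniv (pred : List (Int × List Int)) (node : Int) : List Int :=
  PySem.Set.ofList (node :: (pred.map Prod.snd).flatten)

-- the while loop; stack top at the head (Python append/pop act at the same end).
-- The Nat argument is fuel that merely makes the recursion total; enumerate_to_root_py
-- passes enough fuel that it is never exhausted (proved in the lemmas below).
def loopA (pred : List (Int × List Int)) (limit : Int) :
    Nat → List (Int × List Int) → List (List Int) → List (List Int)
  | 0, _, out => out
  | _ + 1, [], out => out
  | f + 1, (cur, path) :: rest, out =>
    if (out.length : Int) < limit then
      let parents := pvGetD pred cur
      if parents = [] then
        loopA pred limit f rest (out ++ [path.reverse])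
      else
        loopA pred limit f
          (parents.foldl (fun st p => if p ∈ path then st else (p, path ++ [p]) :: st) rest) out
    else out

def enumerate_to_root_py (pred : List (Int × List Int)) (node : Int) (limit : Int) : List (List Int) :=
  loopA pred limit ((pvKmax pred + 1) ^ (pvUniv pred node).length) [(node, [node])] []

-- ===== PORT B =====
-- `pred.get(cur, [])` for B, via the library's first-match search.
def getParents (pred : List (Int × List Int)) (cur : Int) : List Int :=
  ((pred.find? (fun kv => kv.1 = cur)).map Prod.snd).getD []

-- the generator `paths` as the list of everything it yields, in yield order.
-- The Nat argument is fuel bounding the recursion depth, merely making it total;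
-- enumerate_to_root_py_alt passes enough fuel that it is never exhausted.
def pathsB (pred : List (Int × List Int)) : Nat → Int → List Int → List (List Int)
  | 0, _, _ => []
  | f + 1, cur, path =>
    let parents := getParents pred cur
    if parents = [] then [path.reverse]
    else parents.reverse.flatMap
      (fun p => if p ∈ path then [] else pathsB pred f p (path ++ [p]))

-- the consumer loop appends generated paths while len(out) < limit: i.e. `take`.
def enumerate_to_root_py_alt (pred : List (Int × List Int)) (node : Int) (limit : Int) : List (List Int) :=
  (pathsB pred ((pvUniv pred node).length + 1) node [node]).take limit.toNat

-- ===== PRECONDITION & SPEC =====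
def Spec_enumerate_to_root_py (pred : List (Int × List Int)) (node : Int) (limit : Int) (out : List (List Int)) : Prop := out = enumerate_to_root_py_alt pred node limit
instance (pred : List (Int × List Int)) (node : Int) (limit : Int) (out : List (List Int)) : Decidable (Spec_enumerate_to_root_py pred node limit out) := by unfold Spec_enumerate_to_root_py; infer_instance

-- ===== CLAIM (what is proved, stated in full; the proofs are below) =====
def Claim_equal_enumerate_to_root_py : Prop := ∀ (pred : List (Int × List Int)) (node : Int) (limit : Int), Dom_enumerate_to_root_py pred node limit → Spec_enumerate_to_root_py pred node limit (enumerate_to_root_py pred node limit)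

-- ===== LEMMAS AND PROOFS =====

theorem getParents_eq_pvGetD (pred : List (Int × List Int)) (k : Int) :
    getParents pred k = pvGetD pred k := by
  induction pred with
  | nil => rfl
  | cons kv rest ih =>
    obtain ⟨k', v⟩ := kv
    simp only [getParents, pvGetD, List.find?] at *
    by_cases h : k' = k
    · simp [h]
    · simpa [h] using ih

-- weight of a stack entry / of a stack, for the fuel-sufficiency argument
def entryW (B N : Nat) (e : Int × List Int) : Nat := B ^ (N + 1 - e.2.length)
def stackW (B N : Nat) (stack : List (Int × List Int)) : Nat := (stack.map (entryW B N)).sum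

theorem pvGetD_len_le (pred : List (Int × List Int)) (k : Int) :
    (pvGetD pred k).length ≤ pvKmax pred := by
  induction pred with
  | nil => simp [pvGetD, pvKmax]
  | cons kv rest ih =>
    obtain ⟨k', v⟩ := kv
    simp only [pvGetD, pvKmax, List.foldr] at *
    split_ifs with h
    · omega
    · omega

theorem pvGetD_mem_univ (pred : List (Int × List Int)) (node k x : Int)
    (hx : x ∈ pvGetD pred k) : x ∈ pvUniv pred node := by
  have : x ∈ (pred.map Prod.snd).flatten := by
    induction pred with
    | nil => simp [pvGetD] at hx
    | cons kv rest ih =>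
      obtain ⟨k', v⟩ := kv
      simp only [pvGetD] at hx
      split_ifs at hx with h
      · simp [hx]
      · simpa using Or.inr (ih hx)
  rw [pvUniv, PySem.Set.mem_ofList]
  simp [this]

theorem node_mem_univ (pred : List (Int × List Int)) (node : Int) :
    node ∈ pvUniv pred node := by
  rw [pvUniv, PySem.Set.mem_ofList]; simp

theorem nodup_subset_univ_len (pred : List (Int × List Int)) (node : Int)
    (path : List Int) (hn : path.Nodup) (hs : ∀ x ∈ path, x ∈ pvUniv pred node) :
    path.length ≤ (pvUniv pred node).length :=
  (List.subperm_of_subset hn hs).length_le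

-- shape of the stack after the Python for-loop of pushes
theorem foldl_push (path : List Int) (parents : List Int) :
    ∀ rest : List (Int × List Int),
      parents.foldl (fun st p => if p ∈ path then st else (p, path ++ [p]) :: st) rest
        = ((parents.filter (fun p => decide (p ∉ path))).reverse.map
            (fun p => (p, path ++ [p]))) ++ rest := by
  induction parents with
  | nil => intro rest; simp
  | cons q qs ih =>
    intro rest
    by_cases hq : q ∈ path
    · simp [List.foldl_cons, hq, ih]
    · simp [List.foldl_cons, hq, ih]

-- a flatMap that skips members of path equals the flatMap over the filtered list
theorem flatMap_guard (path : List Int) (g : Int → List (List Int)) :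
    ∀ l : List Int,
      l.flatMap (fun p => if p ∈ path then [] else g p)
        = (l.filter (fun p => decide (p ∉ path))).flatMap g := by
  intro l
  induction l with
  | nil => rfl
  | cons q qs ih =>
    by_cases hq : q ∈ path <;> simp [hq, ih]

theorem stackW_push (B N : Nat) (path : List Int) (l : List Int) :
    stackW B N (l.map (fun p => (p, path ++ [p]))) = l.length * B ^ (N - path.length) := by
  induction l with
  | nil => simp [stackW]
  | cons a as ih =>
    simp only [List.map_cons, stackW, List.sum_cons, List.length_cons] at *
    rw [ih]
    have : entryW B N (a, path ++ [a]) = B ^ (N - path.length) := by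
      simp [entryW, Nat.succ_sub_succ]
    rw [this, Nat.succ_mul]
    omega

-- the main simulation: the while loop equals the truncated pure enumeration
theorem loopA_eq_take (pred : List (Int × List Int)) (node : Int) (limit : Int) :
    ∀ (f : Nat) (stack : List (Int × List Int)) (out : List (List Int)),
      stackW (pvKmax pred + 1) (pvUniv pred node).length stack ≤ f →
      (∀ e ∈ stack, e.2.Nodup ∧ ∀ x ∈ e.2, x ∈ pvUniv pred node) →
      loopA pred limit f stack out
        = out ++ (stack.flatMap
            (fun e => pathsB pred ((pvUniv pred node).length + 2 - e.2.length) e.1 e.2)).take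
              ((limit - out.length).toNat) := by
  intro f
  set B := pvKmax pred + 1 with hB
  set N := (pvUniv pred node).length with hN
  induction f with
  | zero =>
    intro stack out hw _
    cases stack with
    | nil => simp [loopA]
    | cons e rest =>
      exfalso
      have h1 : 1 ≤ entryW B N e := Nat.one_le_pow _ _ (by omega)
      have h2 : stackW B N (e :: rest) = entryW B N e + stackW B N rest := by
        simp [stackW]
      omega
  | succ f ih =>
    intro stack out hw hinv
    cases stack with
    | nil => simp [loopA]
    | cons e rest =>
      obtain ⟨cur, path⟩ := e
      have hpathI := hinv (cur, path) (by simp)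
      have hL : path.length ≤ N :=
        nodup_subset_univ_len pred node path hpathI.1 hpathI.2
      have hwstack : stackW B N ((cur, path) :: rest) =
          B ^ (N + 1 - path.length) + stackW B N rest := by
        simp [stackW, entryW]
      have hpow1 : 1 ≤ B ^ (N + 1 - path.length) := Nat.one_le_pow _ _ (by omega)
      have hfuel : N + 2 - path.length = (N + 1 - path.length) + 1 := by omega
      by_cases hl : (out.length : Int) < limit
      · -- loop body runs
        by_cases hp : pvGetD pred cur = []
        · -- leaf: emit the reversed path
          have hrest : stackW B N rest ≤ f := by omega
          rw [loopA]
          simp only [hl, if_true, hp]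
          rw [ih rest (out ++ [path.reverse]) hrest
              (fun e he => hinv e (by simp [he]))]
          have hE : pathsB pred (N + 2 - path.length) cur path = [path.reverse] := by
            rw [hfuel, pathsB]
            simp [getParents_eq_pvGetD, hp]
          have hk : (limit - (out.length : Int)).toNat
              = (limit - ((out ++ [path.reverse]).length : Int)).toNat + 1 := by
            simp only [List.length_append, List.length_cons, List.length_nil]
            push_cast
            omega
          rw [List.flatMap_cons, hE, hk]
          simp
        · -- interior: push the unvisited parents
          set parents := pvGetD pred cur with hpar
          set stack' := parents.foldl
            (fun st p => if p ∈ path then st else (p, path ++ [p]) :: st) rest with hs'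
          have hshape : stack' =
              ((parents.filter (fun p => decide (p ∉ path))).reverse.map
                (fun p => (p, path ++ [p]))) ++ rest := foldl_push path parents rest
          have hw' : stackW B N stack' ≤ f := by
            have hcnt : (parents.filter (fun p => decide (p ∉ path))).length ≤ B - 1 := by
              have h1 := List.length_filter_le (fun p => decide (p ∉ path)) parents
              have h2 : parents.length ≤ pvKmax pred := by
                rw [hpar]; exact pvGetD_len_le pred cur
              omega
            have hsum : stackW B N
                (((parents.filter (fun p => decide (p ∉ path))).reverse.map
                  (fun p => (p, path ++ [p]))))
                = (parents.filter (fun p => decide (p ∉ path))).length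
                    * B ^ (N - path.length) := by
              rw [stackW_push, List.length_reverse]
            have hsplit : stackW B N stack' =
                stackW B N ((parents.filter (fun p => decide (p ∉ path))).reverse.map
                  (fun p => (p, path ++ [p]))) + stackW B N rest := by
              rw [hshape]; simp [stackW]
            have hmul : (parents.filter (fun p => decide (p ∉ path))).length
                * B ^ (N - path.length) ≤ (B - 1) * B ^ (N - path.length) :=
              Nat.mul_le_mul_right _ hcnt
            have hpowsucc : B ^ (N + 1 - path.length)
                = (B - 1) * B ^ (N - path.length) + B ^ (N - path.length) := by
              have h1 : N + 1 - path.length = (N - path.length) + 1 := by omega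
              have h2 : B - 1 + 1 = B := by omega
              calc B ^ (N + 1 - path.length) = B ^ (N - path.length) * B := by
                    rw [h1, pow_succ]
                _ = (B - 1 + 1) * B ^ (N - path.length) := by rw [h2]; ring
                _ = (B - 1) * B ^ (N - path.length) + B ^ (N - path.length) := by ring
            have hpos : 1 ≤ B ^ (N - path.length) := Nat.one_le_pow _ _ (by omega)
            omega
          have hinv' : ∀ e ∈ stack', e.2.Nodup ∧ ∀ x ∈ e.2, x ∈ pvUniv pred node := by
            intro e he
            rw [hshape, List.mem_append] at he
            rcases he with he | he
            · simp only [List.mem_map, List.mem_reverse, List.mem_filter] at he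
              obtain ⟨p, ⟨hpmem, hpnot⟩, rfl⟩ := he
              simp only [decide_eq_true_eq] at hpnot
              constructor
              · have hnd : path.Nodup := hpathI.1
                have hdisj : path.Disjoint [p] := by
                  intro a ha hb
                  simp only [List.mem_singleton] at hb
                  subst hb
                  exact hpnot ha
                exact hnd.append (List.nodup_singleton p) hdisj
              · intro x hx
                simp only [List.mem_append, List.mem_singleton] at hx
                rcases hx with hx | rfl
                · exact hpathI.2 x hx
                · exact pvGetD_mem_univ pred node cur x hpmem
            · exact hinv e (List.mem_cons_of_mem _ he)
          rw [loopA]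
          simp only [hl, if_true, ← hpar, hp, ite_false, ← hs']
          rw [ih stack' out hw' hinv']
          congr 2
          -- head entry's enumeration equals the pushed entries' enumerations
          rw [hshape, List.flatMap_append, List.flatMap_cons]
          congr 1
          have hE : pathsB pred (N + 2 - path.length) cur path
              = (parents.reverse.flatMap
                  (fun p => if p ∈ path then []
                    else pathsB pred (N + 1 - path.length) p (path ++ [p]))) := by
            rw [hfuel, pathsB]
            simp only [getParents_eq_pvGetD, ← hpar, hp, ite_false]
          rw [hE, flatMap_guard, ← List.filter_reverse, List.flatMap_map]
          congr 1
          funext p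
          simp [Nat.succ_sub_succ]
      · -- limit reached: both sides leave out unchanged
        rw [loopA, if_neg hl]
        have : (limit - (out.length : Int)).toNat = 0 := by omega
        simp [this]

-- ===== VERDICT (by name: the statement is the Claim_ definition above) =====
theorem enumerate_to_root_py_spec : Claim_equal_enumerate_to_root_py := by
  intro pred node limit _
  unfold Spec_enumerate_to_root_py enumerate_to_root_py enumerate_to_root_py_alt
  rw [loopA_eq_take pred node limit _ [(node, [node])] []]
  · simp [Nat.succ_sub_succ]
  · simp [stackW, entryW]
  · intro e he
    simp only [List.mem_singleton] at he
    subst he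
    refine ⟨by simp, ?_⟩
    intro x hx
    simp only [List.mem_singleton] at hx
    subst hx
    exact node_mem_univ _ _
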